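-- pv_equiv track=rewrite | github.com/Katarina-Kovacova/Hangman | hangman.py | get_hidden_string
-- ===== SOURCE A (Python) =====
-- def get_hidden_string(positions, ran_word):
-- 	result = []
-- 	# cat 0, 2
-- 	# *a*
-- 	for i, char in enumerate(ran_word):
-- 		if i in positions: # positions are what has yet not been guessed correctly
-- 			result.append('_')
-- 		else:
-- 			result.append(char)
-- 	return ' '.join(result)
--
-- 	return result
-- ===== SOURCE B (Python) =====
-- def get_hidden_string(positions, ran_word):
--     chars = list(ran_word)
--     for p in positions:
--         if 0 <= p < len(chars):
--             chars[p] = '_'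
--     return ' '.join(chars)
-- ===== Notes on version B (the rewrite author's own statement) =====
-- stated objective: alternative
-- what changed: A gathers: for every character index it scans the positions list for membership; B scatters: it writes '_' once per in-range position into a char array and joins, trading the per-index membership scan for direct index writes.
import Mathlib
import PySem

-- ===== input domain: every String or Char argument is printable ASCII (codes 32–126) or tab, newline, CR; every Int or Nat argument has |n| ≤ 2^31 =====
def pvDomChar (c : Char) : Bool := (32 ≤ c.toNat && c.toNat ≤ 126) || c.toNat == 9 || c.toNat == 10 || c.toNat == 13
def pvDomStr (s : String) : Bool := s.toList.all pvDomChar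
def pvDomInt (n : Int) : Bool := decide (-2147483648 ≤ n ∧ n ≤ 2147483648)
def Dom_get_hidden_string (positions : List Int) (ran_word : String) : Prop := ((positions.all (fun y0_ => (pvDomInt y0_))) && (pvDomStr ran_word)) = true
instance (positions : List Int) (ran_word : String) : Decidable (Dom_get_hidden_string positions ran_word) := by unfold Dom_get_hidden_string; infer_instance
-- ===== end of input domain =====

-- B scatters: one write per in-range position into a char array, instead of A's per-index membership scan; return value only.

-- ===== PORT A =====
-- A: result = []; for i, char in enumerate(ran_word): append '_' if i in positions else char; ' '.join(result)
def get_hidden_string (positions : List Int) (ran_word : String) : String :=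
  let result : List String :=
    (PySem.List.enumerate ran_word.toList).foldl
      (fun acc ic => if ic.1 ∈ positions then acc ++ ["_"] else acc ++ [String.mk [ic.2]]) []
  PySem.Str.join " " result

-- ===== PORT B =====
-- B: chars = list(ran_word); for p in positions: if 0 <= p < len(chars): chars[p] = '_'; ' '.join(chars)
def get_hidden_string_alt (positions : List Int) (ran_word : String) : String :=
  let chars :=
    positions.foldl
      (fun cs p => if 0 ≤ p ∧ p < (cs.length : Int) then cs.set p.toNat '_' else cs)
      ran_word.toList
  PySem.Str.join " " (chars.map (fun c => String.mk [c]))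

-- ===== PRECONDITION & SPEC =====
def Spec_get_hidden_string (positions : List Int) (ran_word : String) (out : String) : Prop := out = get_hidden_string_alt positions ran_word
instance (positions : List Int) (ran_word : String) (out : String) : Decidable (Spec_get_hidden_string positions ran_word out) := by unfold Spec_get_hidden_string; infer_instance

-- ===== CLAIM (what is proved, stated in full; the proofs are below) =====
def Claim_equal_get_hidden_string : Prop := ∀ (positions : List Int) (ran_word : String), Dom_get_hidden_string positions ran_word → Spec_get_hidden_string positions ran_word (get_hidden_string positions ran_word)

-- ===== LEMMAS AND PROOFS =====

-- A's loop is a map over the enumerated characters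
theorem foldl_if_append_map {α β : Type} (P : α → Prop) [DecidablePred P] (f g : α → β) :
    ∀ (l : List α) (acc : List β),
      l.foldl (fun a x => if P x then a ++ [f x] else a ++ [g x]) acc =
        acc ++ l.map (fun x => if P x then f x else g x) := by
  intro l
  induction l with
  | nil => intro acc; simp
  | cons x xs ih =>
    intro acc
    by_cases h : P x <;> simp [List.foldl_cons, h, ih]

def pvScat (positions : List Int) (cs : List Char) : List Char :=
  positions.foldl
    (fun cs p => if 0 ≤ p ∧ p < (cs.length : Int) then cs.set p.toNat '_' else cs) cs

theorem pvScat_length (positions : List Int) :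
    ∀ cs : List Char, (pvScat positions cs).length = cs.length := by
  induction positions with
  | nil => intro cs; rfl
  | cons p ps ih =>
    intro cs
    simp only [pvScat, List.foldl_cons]
    split_ifs with h
    · simpa [pvScat] using (ih (cs.set p.toNat '_')).trans (by simp)
    · exact ih cs

theorem pvScat_getElem (positions : List Int) :
    ∀ (cs : List Char) (i : Nat) (hi : i < cs.length),
      (pvScat positions cs)[i]'(by rw [pvScat_length]; exact hi) =
        if (i : Int) ∈ positions then '_' else cs[i] := by
  induction positions with
  | nil => intro cs i hi; simp [pvScat]
  | cons p ps ih =>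
    intro cs i hi
    have hstep : pvScat (p :: ps) cs =
        pvScat ps (if 0 ≤ p ∧ p < (cs.length : Int) then cs.set p.toNat '_' else cs) := by
      simp [pvScat, List.foldl_cons]
    by_cases hmem : (i : Int) ∈ ps
    · -- inner recursion writes it regardless
      by_cases hr : 0 ≤ p ∧ p < (cs.length : Int)
      · rw [if_pos hr] at hstep
        simp only [hstep]
        rw [ih (cs.set p.toNat '_') i (by simpa using hi)]
        simp [hmem]
      · rw [if_neg hr] at hstep
        simp only [hstep]
        rw [ih cs i hi]
        simp [hmem]
    · by_cases hip : (i : Int) = p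
      · -- p is exactly i: in range, set fires
        have hr : 0 ≤ p ∧ p < (cs.length : Int) := by
          constructor
          · omega
          · rw [← hip]; exact_mod_cast hi
        rw [if_pos hr] at hstep
        have hpt : p.toNat = i := by omega
        simp only [hstep]
        rw [ih (cs.set p.toNat '_') i (by simpa using hi)]
        simp [hpt, List.getElem_set_self, hip]
      · -- i untouched by this step
        have hne : ∀ (h : 0 ≤ p ∧ p < (cs.length : Int)), p.toNat ≠ i := by
          intro h; omega
        have hval : ∀ (cs' : List Char) (h' : cs' = if 0 ≤ p ∧ p < (cs.length : Int) then cs.set p.toNat '_' else cs),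
            cs'.length = cs.length ∧ ∀ (hl : i < cs'.length), cs'[i] = cs[i] := by
          intro cs' h'
          subst h'
          split_ifs with hr
          · exact ⟨by simp, fun hl => List.getElem_set_ne (hne hr) hl⟩
          · exact ⟨rfl, fun _ => rfl⟩
        obtain ⟨hlen, hgi⟩ := hval _ rfl
        simp only [hstep]
        rw [ih _ i (by rw [hlen]; exact hi)]
        rw [hgi (by rw [hlen]; exact hi)]
        simp [hmem, List.mem_cons, hip]

theorem get_hidden_string_spec : Claim_equal_get_hidden_string := by
  unfold Claim_equal_get_hidden_string
  intro positions ran_word _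
  unfold Spec_get_hidden_string get_hidden_string get_hidden_string_alt
  simp only []
  congr 1
  rw [foldl_if_append_map (fun ic : Int × Char => ic.1 ∈ positions)
      (fun _ => "_") (fun ic => String.mk [ic.2])
      (PySem.List.enumerate ran_word.toList) []]
  · apply List.ext_getElem
    · have hl := pvScat_length positions ran_word.toList
      simp only [pvScat] at hl
      simp [PySem.List.length_enumerate, hl]
    · intro i h1 h2
      have hi : i < ran_word.toList.length := by
        simpa [PySem.List.length_enumerate] using h1
      simp only [List.nil_append] at h1 ⊢
      rw [List.getElem_map, List.getElem_map]
      rw [PySem.List.getElem_enumerate]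
      show (if ((0 : Int) + i ∈ positions) then "_" else String.mk [ran_word.toList[i]]) = _
      have hsc := pvScat_getElem positions ran_word.toList i hi
      have key := congrArg (fun c => String.mk [c]) hsc
      simp only [zero_add]
      refine Eq.trans ?_ key.symm
      split_ifs with h <;> rfl
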